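-- pv_equiv track=rewrite | github.com/cobradeca-a11y/cpp_mvp | backend/association_engine.py | page_from_page_id
-- ===== SOURCE A (Python) =====
-- from typing import Any
--
-- def page_from_page_id(page_id: Any) -> int | None:
--     if not isinstance(page_id, str):
--         return None
--     digits = "".join(ch for ch in page_id if ch.isdigit())
--     if not digits:
--         return None
--     try:
--         return int(digits)
--     except ValueError:
--         return None
-- ===== SOURCE B (Python) =====
-- def page_from_page_id(page_id):
--     if not isinstance(page_id, str):
--         return None
--     acc = None
--     for ch in page_id:
--         if "0" <= ch <= "9":
--             acc = (0 if acc is None else acc) * 10 + (ord(ch) - 48)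
--     return acc
-- ===== Notes on version B (the rewrite author's own statement) =====
-- stated objective: alternative
-- what changed: B replaces A's two-stage filter-join-then-int() parse by a single left-to-right pass that keeps a running integer accumulator (None until the first ASCII digit is seen), so no intermediate string is built and no parser is called.
import Mathlib
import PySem

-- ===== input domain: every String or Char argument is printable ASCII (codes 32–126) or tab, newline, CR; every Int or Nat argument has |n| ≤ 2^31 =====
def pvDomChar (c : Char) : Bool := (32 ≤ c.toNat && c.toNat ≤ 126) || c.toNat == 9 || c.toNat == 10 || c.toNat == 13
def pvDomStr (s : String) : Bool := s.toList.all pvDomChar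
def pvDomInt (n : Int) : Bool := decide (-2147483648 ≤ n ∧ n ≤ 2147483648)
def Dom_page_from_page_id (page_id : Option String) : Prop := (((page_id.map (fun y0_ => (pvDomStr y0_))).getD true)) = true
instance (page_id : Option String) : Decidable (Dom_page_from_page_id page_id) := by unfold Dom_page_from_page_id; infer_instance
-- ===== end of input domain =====

-- B: single left-to-right pass with a running integer accumulator (none until the first digit)
-- instead of A's filter-join-then-parse; alternative decomposition, same O(n) cost.


-- ===== PORT A =====
-- Hand-port of `int(digits)` for THIS call site, where `digits` is always a string of ASCII
-- digit characters '0'..'9' (it is the output of the isdigit filter, and on the ASCII input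
-- domain isdigit means exactly '0' ≤ ch ≤ '9').  On such strings int() is exactly: ValueError
-- (here: none) for the empty string, otherwise plain decimal evaluation.  It is exact there.
def pyIntDigits? (cs : List Char) : Option Int :=
  if cs ≠ [] ∧ cs.all PySem.Chars.isdigit then
    some (cs.foldl (fun a c => a * 10 + ((c.toNat : Int) - 48)) 0)
  else none

def page_from_page_id (page_id : Option String) : Option Int :=
  match page_id with
  | none => none                                    -- not isinstance(page_id, str)
  | some s =>
    let digits := s.toList.filter PySem.Chars.isdigit
    if digits = [] then none
    else
      match pyIntDigits? digits with                -- int(digits), try/except ValueError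
      | some n => some n
      | none => none

-- ===== PORT B =====
def pageAltLoop : List Char → Option Int → Option Int
  | [], acc => acc
  | c :: cs, acc =>
    if '0' ≤ c ∧ c ≤ '9' then
      pageAltLoop cs (some ((acc.getD 0) * 10 + ((c.toNat : Int) - 48)))
    else
      pageAltLoop cs acc

def page_from_page_id_alt (page_id : Option String) : Option Int :=
  match page_id with
  | none => none
  | some s => pageAltLoop s.toList none

-- ===== PRECONDITION & SPEC =====
def Spec_page_from_page_id (page_id : Option String) (out : Option Int) : Prop := out = page_from_page_id_alt page_id
instance (page_id : Option String) (out : Option Int) : Decidable (Spec_page_from_page_id page_id out) := by unfold Spec_page_from_page_id; infer_instance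

-- ===== CLAIM (what is proved, stated in full; the proofs are below) =====
def Claim_equal_page_from_page_id : Prop := ∀ (page_id : Option String), Dom_page_from_page_id page_id → Spec_page_from_page_id page_id (page_from_page_id page_id)

-- ===== LEMMAS AND PROOFS =====
-- Loop invariant for B: the accumulator after scanning cs is exactly "no digit seen yet" (acc
-- unchanged) or the decimal fold of the digits of cs started from acc.getD 0.
theorem pageAltLoop_eq (cs : List Char) : ∀ acc : Option Int,
    pageAltLoop cs acc =
      if (cs.filter PySem.Chars.isdigit) = [] then acc
      else some ((cs.filter PySem.Chars.isdigit).foldl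
        (fun a c => a * 10 + ((c.toNat : Int) - 48)) (acc.getD 0)) := by
  induction cs with
  | nil => intro acc; simp [pageAltLoop]
  | cons c cs ih =>
    intro acc
    by_cases hc : ('0' ≤ c ∧ c ≤ '9')
    · have hd : PySem.Chars.isdigit c = true := by
        simp [PySem.Chars.isdigit, hc.1, hc.2]
      simp only [pageAltLoop, if_pos hc, List.filter_cons_of_pos hd, ih]
      rcases cs.filter PySem.Chars.isdigit with _ | _ <;> simp
    · have hd : ¬ PySem.Chars.isdigit c = true := by
        simp only [PySem.Chars.isdigit, Bool.and_eq_true, decide_eq_true_eq]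
        exact hc
      simp only [pageAltLoop, if_neg hc, List.filter_cons_of_neg hd, ih]

-- ===== VERDICT (by name: the statement is the Claim_ definition above) =====
theorem page_from_page_id_spec : Claim_equal_page_from_page_id := by
  unfold Claim_equal_page_from_page_id
  intro page_id _
  unfold Spec_page_from_page_id
  match page_id with
  | none => rfl
  | some s =>
    simp only [page_from_page_id, page_from_page_id_alt, pageAltLoop_eq]
    by_cases h : s.toList.filter PySem.Chars.isdigit = []
    · simp [h]
    · simp [h, pyIntDigits?]
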